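-- pv_equiv track=rewrite | github.com/Jusminno2/algorithm | movie/CodingInterviewQuiz04/snake.py | snake_string_v1
-- ===== SOURCE A (Python) =====
-- from typing import List
--
-- def snake_string_v1(chars: str) -> List[List[str]]:
--     result = [[], [], []]
--     result_indexes = {0, 1, 2}
--     insert_index = 1
--     for i, s in enumerate(chars):
--         if i % 4 == 1:
--             insert_index = 0
--         elif i % 2 == 0:
--             insert_index = 1
--         elif i % 4 == 3:
--             insert_index = 2
--         result[insert_index].append(s)
--         for rest in result_indexes - {insert_index}:
--             result[rest].append(" ")
--     return result
-- ===== SOURCE B (Python) =====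
-- def snake_string_v1(chars):
--     return [
--         [c if i % 4 == 1 else " " for i, c in enumerate(chars)],
--         [c if i % 2 == 0 else " " for i, c in enumerate(chars)],
--         [c if i % 4 == 3 else " " for i, c in enumerate(chars)],
--     ]
-- ===== Notes on version B (the rewrite author's own statement) =====
-- stated objective: simpler
-- what changed: B builds each of the three rows by its own independent comprehension with a modular condition (row0: i%4==1, row1: i%2==0, row2: i%4==3), instead of A's single fused pass that tracks a current row and pads the other rows via set difference; dropping the per-char set construction and branch bookkeeping is the constant-factor gain.
import Mathlib
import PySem

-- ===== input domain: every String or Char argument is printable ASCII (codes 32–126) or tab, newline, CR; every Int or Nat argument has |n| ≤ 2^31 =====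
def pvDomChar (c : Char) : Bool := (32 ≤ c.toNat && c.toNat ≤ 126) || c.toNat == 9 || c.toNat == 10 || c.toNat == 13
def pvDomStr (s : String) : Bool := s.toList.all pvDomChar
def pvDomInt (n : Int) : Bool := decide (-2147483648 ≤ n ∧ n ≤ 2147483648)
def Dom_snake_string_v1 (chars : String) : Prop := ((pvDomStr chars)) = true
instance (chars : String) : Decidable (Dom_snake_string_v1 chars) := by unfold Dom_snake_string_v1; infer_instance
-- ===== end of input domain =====

-- B builds each of the three snake rows by its own independent scan with a modular
-- condition, instead of A's single fused pass that pads the other rows via set difference.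


-- ===== PORT A =====
-- state: (row0, row1, row2, insert_index); for each (i, s): pick the row by i's
-- residue, append s there and " " to the two other rows (iterating {0,1,2}\{ii}).
def snakeStepA (st : List String × List String × List String × Int) (p : Int × Char) :
    List String × List String × List String × Int :=
  let ii : Int :=
    if PySem.Int.mod p.1 4 = 1 then 0
    else if PySem.Int.mod p.1 2 = 0 then 1
    else if PySem.Int.mod p.1 4 = 3 then 2
    else st.2.2.2
  let r0 := if ii = 0 then st.1 ++ [String.ofList [p.2]] else st.1 ++ [" "]
  let r1 := if ii = 1 then st.2.1 ++ [String.ofList [p.2]] else st.2.1 ++ [" "]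
  let r2 := if ii = 2 then st.2.2.1 ++ [String.ofList [p.2]] else st.2.2.1 ++ [" "]
  (r0, r1, r2, ii)

def snake_string_v1 (chars : String) : List (List String) :=
  let st := (PySem.List.enumerate chars.toList 0).foldl snakeStepA ([], [], [], 1)
  [st.1, st.2.1, st.2.2.1]

-- ===== PORT B =====
-- each row is an independent scan of enumerate(chars) with its own modular test
def snakeRow (test : Int → Bool) (chars : String) : List String :=
  (PySem.List.enumerate chars.toList 0).map
    (fun p => if test p.1 then String.ofList [p.2] else " ")

def snake_string_v1_alt (chars : String) : List (List String) :=
  [ snakeRow (fun i => PySem.Int.mod i 4 = 1) chars,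
    snakeRow (fun i => PySem.Int.mod i 2 = 0) chars,
    snakeRow (fun i => PySem.Int.mod i 4 = 3) chars ]

-- ===== PRECONDITION & SPEC =====
def Spec_snake_string_v1 (chars : String) (out : List (List String)) : Prop := out = snake_string_v1_alt chars
instance (chars : String) (out : List (List String)) : Decidable (Spec_snake_string_v1 chars out) := by unfold Spec_snake_string_v1; infer_instance

-- ===== CLAIM (what is proved, stated in full; the proofs are below) =====
def Claim_equal_snake_string_v1 : Prop := ∀ (chars : String), Dom_snake_string_v1 chars → Spec_snake_string_v1 chars (snake_string_v1 chars)

-- ===== LEMMAS AND PROOFS =====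

-- row as a map over an enumeration starting at k
def rowFrom (test : Int → Bool) (l : List Char) (k : Int) : List String :=
  (PySem.List.enumerate l k).map (fun p => if test p.1 then String.ofList [p.2] else " ")

lemma rowFrom_nil (test : Int → Bool) (k : Int) : rowFrom test [] k = [] := by
  simp [rowFrom, PySem.List.enumerate_nil]

lemma rowFrom_cons (test : Int → Bool) (c : Char) (l : List Char) (k : Int) :
    rowFrom test (c :: l) k =
      (if test k then String.ofList [c] else " ") :: rowFrom test l (k + 1) := by
  simp [rowFrom, PySem.List.enumerate_cons]

-- insert_index chosen for index k (every residue hits a branch, so the old index is unused)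
def idxOf (k : Nat) : Int := if k % 4 = 1 then 0 else if k % 2 = 0 then 1 else 2

lemma step_spec (k : Nat) (x : Char) (a b c : List String) (ii : Int) :
    snakeStepA (a, b, c, ii) ((k : Int), x) =
      (a ++ [if (k : Int) % 4 = 1 then String.ofList [x] else " "],
       b ++ [if (k : Int) % 2 = 0 then String.ofList [x] else " "],
       c ++ [if (k : Int) % 4 = 3 then String.ofList [x] else " "],
       idxOf k) := by
  have e4 : PySem.Int.mod (k : Int) 4 = (k : Int) % 4 :=
    PySem.Int.mod_eq_emod_of_pos (by norm_num)
  have e2 : PySem.Int.mod (k : Int) 2 = (k : Int) % 2 :=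
    PySem.Int.mod_eq_emod_of_pos (by norm_num)
  simp only [snakeStepA, idxOf, e4, e2]
  split_ifs <;> first | rfl | (exfalso; omega)

-- the fused fold equals the three independent rows, for any start index and accumulators
lemma foldA_eq (l : List Char) : ∀ (k : Nat) (a b c : List String) (ii : Int),
    (PySem.List.enumerate l (k : Int)).foldl snakeStepA (a, b, c, ii) =
      (a ++ rowFrom (fun i => PySem.Int.mod i 4 = 1) l k,
       b ++ rowFrom (fun i => PySem.Int.mod i 2 = 0) l k,
       c ++ rowFrom (fun i => PySem.Int.mod i 4 = 3) l k,
       if l = [] then ii else idxOf (k + l.length - 1)) := by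
  induction l with
  | nil => intro k a b c ii; simp [PySem.List.enumerate_nil, rowFrom_nil]
  | cons x xs ih =>
    intro k a b c ii
    rw [PySem.List.enumerate_cons, List.foldl_cons, step_spec]
    have hk : ((k : Int) + 1) = ((k + 1 : Nat) : Int) := by push_cast; ring
    rw [hk, ih]
    rw [rowFrom_cons, rowFrom_cons, rowFrom_cons]
    have e4 : PySem.Int.mod (k : Int) 4 = (k : Int) % 4 :=
      PySem.Int.mod_eq_emod_of_pos (by norm_num)
    have e2 : PySem.Int.mod (k : Int) 2 = (k : Int) % 2 :=
      PySem.Int.mod_eq_emod_of_pos (by norm_num)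
    simp only [e4, e2, decide_eq_true_eq, List.append_assoc, List.singleton_append]
    refine Prod.ext rfl (Prod.ext rfl (Prod.ext rfl ?_))
    cases xs with
    | nil => simp
    | cons y ys =>
      simp only [List.length_cons, if_neg (List.cons_ne_nil _ _)]
      congr 1
      omega

-- ===== VERDICT (by name: the statement is the Claim_ definition above) =====
theorem snake_string_v1_spec : Claim_equal_snake_string_v1 := by
  intro chars _
  show _ = _
  unfold snake_string_v1 snake_string_v1_alt snakeRow
  have h := foldA_eq chars.toList 0 [] [] [] 1
  simp only [Nat.cast_zero, List.nil_append] at h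
  rw [h]
  rfl
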